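-- pv_equiv track=rewrite | github.com/im-jonathan/hackerRankProblemSolving | strings/buildAPalindrome.py | build_palindrome_lookup
-- ===== SOURCE A (Python) =====
-- def build_palindrome_lookup(s: str) -> list:
--     sx = f"|{'|'.join(s)}|"
--     sxlen = len(sx)
--     rslt = [0] * sxlen
--     c, r, m, n = 0, 0, 0, 0
--     for i in range(1, sxlen):
--         if i > r:
--             rslt[i] = 0
--             m = i - 1
--             n = i + 1
--         else:
--             i2 = c * 2 - i
--             if rslt[i2] < r - i:
--                 rslt[i] = rslt[i2]
--                 m = -1
--             else:
--                 rslt[i] = r - i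
--                 n = r + 1
--                 m = i * 2 - n
--         while m >= 0 and n < sxlen and sx[m] == sx[n]:
--             rslt[i] += 1
--             m -= 1
--             n += 1
--         if i + rslt[i] > r:
--             r = i + rslt[i]
--             c = i
--     res = [0] * len(s)
--     for i in range(1, sxlen - 1):
--         idx = (i - rslt[i]) // 2
--         res[idx] = max(res[idx], rslt[i])
--     return res
-- ===== SOURCE B (Python) =====
-- def _pal_radius(sx: str, i: int) -> int:
--     """Length of the longest palindrome in sx centered at i, as an expansion radius."""
--     d = 0
--     while i - d - 1 >= 0 and i + d + 1 < len(sx) and sx[i - d - 1] == sx[i + d + 1]: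
--         d += 1
--     return d
--
--
-- def build_palindrome_lookup(s: str) -> list:
--     sx = f"|{'|'.join(s)}|"
--     sxlen = len(sx)
--     rad = [_pal_radius(sx, i) for i in range(sxlen)]
--     res = [0] * len(s)
--     for i in range(1, sxlen - 1):
--         idx = (i - rad[i]) // 2
--         res[idx] = max(res[idx], rad[i])
--     return res
-- ===== Notes on version B (the rewrite author's own statement) =====
-- stated objective: simpler
-- what changed: Replaced Manacher's mirror/right-boundary state machine (center c, border r, mirrored radii) by a plain expand-around-center scan that recomputes each radius from scratch, keeping the same separator-interleaved string and the same final aggregation pass.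
import Mathlib
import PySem

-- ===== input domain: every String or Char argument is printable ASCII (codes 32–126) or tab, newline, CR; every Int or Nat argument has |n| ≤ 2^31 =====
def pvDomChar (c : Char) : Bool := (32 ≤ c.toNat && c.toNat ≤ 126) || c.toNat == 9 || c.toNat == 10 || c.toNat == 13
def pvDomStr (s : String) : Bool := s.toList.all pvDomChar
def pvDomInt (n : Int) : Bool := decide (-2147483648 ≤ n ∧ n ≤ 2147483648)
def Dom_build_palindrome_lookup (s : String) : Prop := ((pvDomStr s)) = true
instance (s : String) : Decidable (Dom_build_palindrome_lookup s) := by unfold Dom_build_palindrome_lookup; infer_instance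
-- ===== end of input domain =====

-- B replaces Manacher's mirror/right-boundary state machine by plain expand-around-center
-- (objective: simpler); same return value for every input.

-- ===== PORT A =====
-- sx = f"|{'|'.join(s)}|"  (both Pythons build the same separator-interleaved string)
def pvJoinBar (l : List Char) : List Char :=
  '|' :: PySem.Chars.join ['|'] (l.map (fun c => [c])) ++ ['|']

-- the inner `while m >= 0 and n < sxlen and sx[m] == sx[n]` loop; `rslt[i] += 1` is
-- carried as the third component and written back once after the loop (same value)
def pvWhileA (sx : List Char) (m n cur : Int) : Int × Int × Int :=
  if h : 0 ≤ m ∧ n < (sx.length : Int) ∧ PySem.List.pyGet? sx m = PySem.List.pyGet? sx n then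
    pvWhileA sx (m - 1) (n + 1) (cur + 1)
  else (cur, m, n)
termination_by ((sx.length : Int) - n).toNat
decreasing_by omega

-- one iteration of A's main `for i in range(1, sxlen)` loop; state = (rslt, c, r, m, n).
-- rslt[·] reads/writes are always in range on real runs (indices proved in range below);
-- pyGetD/pySetD are the total forms of Python's indexing.
def pvStepA (sx : List Char) (st : List Int × Int × Int × Int × Int) (i : Int) :
    List Int × Int × Int × Int × Int :=
  match st with
  | (rslt, c, r, _m, n) =>
    let (rslt1, m1, n1) :=
      if i > r then (PySem.List.pySetD rslt i 0, i - 1, i + 1)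
      else
        let i2 := c * 2 - i
        let v2 := PySem.List.pyGetD rslt i2 0
        if v2 < r - i then (PySem.List.pySetD rslt i v2, -1, n)
        else
          let n' := r + 1
          (PySem.List.pySetD rslt i (r - i), i * 2 - n', n')
    let (cur, m2, n2) := pvWhileA sx m1 n1 (PySem.List.pyGetD rslt1 i 0)
    let rslt2 := PySem.List.pySetD rslt1 i cur
    if i + cur > r then (rslt2, i, i + cur, m2, n2) else (rslt2, c, r, m2, n2)
  -- `m` and `n` are dead after the branch assigns them but Python keeps them across
  -- iterations, so the state carries them too

-- the final `for i in range(1, sxlen - 1)` aggregation loop of A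
def pvResA (slen : Nat) (sxlen : Int) (rslt : List Int) : List Int :=
  (PySem.List.pyRange 1 (sxlen - 1) 1).foldl (fun res i =>
    let v := PySem.List.pyGetD rslt i 0
    let idx := PySem.Int.floordiv (i - v) 2
    PySem.List.pySetD res idx (max (PySem.List.pyGetD res idx 0) v)) (List.replicate slen (0 : Int))

def build_palindrome_lookup (s : String) : List Int :=
  let sx := pvJoinBar s.toList
  let sxlen : Int := sx.length
  let st := (PySem.List.pyRange 1 sxlen 1).foldl (pvStepA sx)
      (List.replicate sx.length (0 : Int), 0, 0, 0, 0)
  pvResA s.toList.length sxlen st.1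

-- ===== PORT B =====
-- B's helper _pal_radius: expand around center i while the mirror characters match
def pvExpandB (sx : List Char) (i d : Int) : Int :=
  if h : 0 ≤ i - d - 1 ∧ i + d + 1 < (sx.length : Int) ∧
      PySem.List.pyGet? sx (i - d - 1) = PySem.List.pyGet? sx (i + d + 1) then
    pvExpandB sx i (d + 1)
  else d
termination_by ((sx.length : Int) - (i + d)).toNat
decreasing_by omega

-- the final `for i in range(1, sxlen - 1)` aggregation loop of B (same line in both Pythons)
def pvResB (slen : Nat) (sxlen : Int) (rad : List Int) : List Int :=
  (PySem.List.pyRange 1 (sxlen - 1) 1).foldl (fun res i =>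
    let v := PySem.List.pyGetD rad i 0
    let idx := PySem.Int.floordiv (i - v) 2
    PySem.List.pySetD res idx (max (PySem.List.pyGetD res idx 0) v)) (List.replicate slen (0 : Int))

def build_palindrome_lookup_alt (s : String) : List Int :=
  let sx := pvJoinBar s.toList
  let sxlen : Int := sx.length
  let rad := (PySem.List.pyRange 0 sxlen 1).map (fun i => pvExpandB sx i 0)
  pvResB s.toList.length sxlen rad

-- ===== PRECONDITION & SPEC =====
def Spec_build_palindrome_lookup (s : String) (out : List Int) : Prop := out = build_palindrome_lookup_alt s
instance (s : String) (out : List Int) : Decidable (Spec_build_palindrome_lookup s out) := by unfold Spec_build_palindrome_lookup; infer_instance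

-- ===== CLAIM (what is proved, stated in full; the proofs are below) =====
def Claim_equal_build_palindrome_lookup : Prop := ∀ (s : String), Dom_build_palindrome_lookup s → Spec_build_palindrome_lookup s (build_palindrome_lookup s)

-- ===== LEMMAS AND PROOFS =====

-- `pvRad sx i` = B's palindrome radius at center i
def pvRad (sx : List Char) (i : Int) : Int := pvExpandB sx i 0

-- the k-th expansion step around center i succeeds
def pvMatch (sx : List Char) (i k : Int) : Prop :=
  0 ≤ i - k ∧ i + k < (sx.length : Int) ∧
    PySem.List.pyGet? sx (i - k) = PySem.List.pyGet? sx (i + k)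

theorem pvMatch_succ (sx : List Char) (i d : Int) :
    pvMatch sx i (d + 1) ↔
      (0 ≤ i - d - 1 ∧ i + d + 1 < (sx.length : Int) ∧
        PySem.List.pyGet? sx (i - d - 1) = PySem.List.pyGet? sx (i + d + 1)) := by
  unfold pvMatch
  rw [show i - (d + 1) = i - d - 1 by ring, show i + (d + 1) = i + d + 1 by ring]

theorem pvExpandB_of_match (sx : List Char) (i d : Int) (h : pvMatch sx i (d + 1)) :
    pvExpandB sx i d = pvExpandB sx i (d + 1) := by
  rw [pvExpandB, dif_pos ((pvMatch_succ sx i d).1 h)]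

theorem pvExpandB_of_not_match (sx : List Char) (i d : Int) (h : ¬ pvMatch sx i (d + 1)) :
    pvExpandB sx i d = d := by
  rw [pvExpandB, dif_neg (fun hh => h ((pvMatch_succ sx i d).2 hh))]

theorem pvExpandB_le (sx : List Char) (i d : Int) : d ≤ pvExpandB sx i d := by
  induction d using pvExpandB.induct (sx := sx) (i := i) with
  | case1 d h ih => rw [pvExpandB, dif_pos h]; omega
  | case2 d h => rw [pvExpandB, dif_neg h]

theorem pvExpandB_match (sx : List Char) (i d : Int) :
    ∀ k, d < k → k ≤ pvExpandB sx i d → pvMatch sx i k := by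
  induction d using pvExpandB.induct (sx := sx) (i := i) with
  | case1 d h ih =>
    intro k hk1 hk2
    rw [pvExpandB, dif_pos h] at hk2
    rcases eq_or_lt_of_le (by omega : d + 1 ≤ k) with he | hl
    · exact he ▸ (pvMatch_succ sx i d).2 h
    · exact ih k hl hk2
  | case2 d h =>
    intro k hk1 hk2
    rw [pvExpandB, dif_neg h] at hk2
    omega

theorem pvExpandB_not_match (sx : List Char) (i d : Int) :
    ¬ pvMatch sx i (pvExpandB sx i d + 1) := by
  induction d using pvExpandB.induct (sx := sx) (i := i) with
  | case1 d h ih => rw [pvExpandB, dif_pos h]; exact ih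
  | case2 d h =>
    rw [pvExpandB, dif_neg h]
    exact fun hh => h ((pvMatch_succ sx i d).1 hh)

theorem pvExpandB_chain (sx : List Char) (i : Int) :
    ∀ d, 0 ≤ d → (∀ k, 1 ≤ k → k ≤ d → pvMatch sx i k) →
      pvExpandB sx i 0 = pvExpandB sx i d := by
  intro d hd
  induction d, hd using Int.le_induction with
  | base => intro _; rfl
  | succ d hd ih =>
    intro hm
    rw [ih (fun k hk1 hk2 => hm k hk1 (by omega)),
        pvExpandB_of_match sx i d (hm (d + 1) (by omega) le_rfl)]

theorem pvRad_nonneg (sx : List Char) (i : Int) : 0 ≤ pvRad sx i := pvExpandB_le sx i 0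

theorem pvRad_match (sx : List Char) (i : Int) :
    ∀ k, 0 < k → k ≤ pvRad sx i → pvMatch sx i k := pvExpandB_match sx i 0

theorem pvRad_not_match (sx : List Char) (i : Int) : ¬ pvMatch sx i (pvRad sx i + 1) :=
  pvExpandB_not_match sx i 0

theorem pvRad_bounds (sx : List Char) (i : Int) (h0 : 0 ≤ i) (h1 : i < (sx.length : Int)) :
    0 ≤ i - pvRad sx i ∧ i + pvRad sx i < (sx.length : Int) := by
  have hn := pvRad_nonneg sx i
  rcases eq_or_lt_of_le hn with he | hl
  · omega
  · have := pvExpandB_match sx i 0 (pvRad sx i) hl le_rfl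
    exact ⟨this.1, this.2.1⟩

theorem pvRad_zero (sx : List Char) : pvRad sx 0 = 0 := by
  unfold pvRad
  exact pvExpandB_of_not_match sx 0 0 (fun h => by have := h.1; omega)

-- characterization: any e with all matches up to e and no match at e+1 is the radius
theorem pvRad_eq_of (sx : List Char) (i e : Int) (he : 0 ≤ e)
    (hall : ∀ k, 1 ≤ k → k ≤ e → pvMatch sx i k) (hnot : ¬ pvMatch sx i (e + 1)) :
    pvRad sx i = e := by
  unfold pvRad
  rw [pvExpandB_chain sx i e he hall]
  exact pvExpandB_of_not_match sx i e hnot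

-- palindromic symmetry around a center, for offsets of either sign
theorem pvSym (sx : List Char) (c t : Int) (h1 : -(pvRad sx c) ≤ t) (h2 : t ≤ pvRad sx c) :
    PySem.List.pyGet? sx (c - t) = PySem.List.pyGet? sx (c + t) := by
  rcases lt_trichotomy t 0 with hneg | hz | hpos
  · have := (pvRad_match sx c (-t) (by omega) (by omega)).2.2
    rw [show c - t = c + -t by ring, show c + t = c - -t by ring]
    exact this.symm
  · rw [hz]; ring_nf
  · exact (pvRad_match sx c t (by omega) (by omega)).2.2

-- the mirror argument: inside the palindrome around c, expansion steps at i and at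
-- its mirror 2c-i succeed or fail together
theorem pvMirror_match (sx : List Char) (c i k : Int)
    (hc0 : 0 ≤ c) (hclen : c < (sx.length : Int)) (hci : c < i)
    (hk1 : 1 ≤ k) (hk2 : k ≤ c + pvRad sx c - i) :
    (pvMatch sx i k ↔ pvMatch sx (c * 2 - i) k) := by
  obtain ⟨hb1, hb2⟩ := pvRad_bounds sx c hc0 hclen
  have e1 : PySem.List.pyGet? sx (c * 2 - i - k) = PySem.List.pyGet? sx (i + k) := by
    have := pvSym sx c (i - c + k) (by omega) (by omega)
    rw [show c - (i - c + k) = c * 2 - i - k by ring, show c + (i - c + k) = i + k by ring] at this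
    exact this
  have e2 : PySem.List.pyGet? sx (i - k) = PySem.List.pyGet? sx (c * 2 - i + k) := by
    have := pvSym sx c (i - c - k) (by omega) (by omega)
    rw [show c - (i - c - k) = c * 2 - i + k by ring, show c + (i - c - k) = i - k by ring] at this
    exact this.symm
  unfold pvMatch
  constructor
  · rintro ⟨-, -, h3⟩
    exact ⟨by omega, by omega, by rw [e1, ← h3, e2]⟩
  · rintro ⟨-, -, h3⟩
    exact ⟨by omega, by omega, by rw [e2, ← h3, ← e1]⟩

-- Manacher case "mirror palindrome strictly inside": radii are equal
theorem pvMirror_lt (sx : List Char) (c i : Int)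
    (hc0 : 0 ≤ c) (hclen : c < (sx.length : Int)) (hci : c < i)
    (hlt : pvRad sx (c * 2 - i) < c + pvRad sx c - i) :
    pvRad sx i = pvRad sx (c * 2 - i) := by
  have hnn := pvRad_nonneg sx (c * 2 - i)
  refine pvRad_eq_of sx i (pvRad sx (c * 2 - i)) hnn ?_ ?_
  · intro k hk1 hk2
    exact (pvMirror_match sx c i k hc0 hclen hci hk1 (by omega)).2
      (pvRad_match sx (c * 2 - i) k (by omega) hk2)
  · intro hm
    exact pvRad_not_match sx (c * 2 - i)
      ((pvMirror_match sx c i (pvRad sx (c * 2 - i) + 1) hc0 hclen hci (by omega) (by omega)).1 hm)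

-- Manacher case "mirror palindrome reaches the border": expansion may restart at r - i
theorem pvMirror_ge (sx : List Char) (c i : Int)
    (hc0 : 0 ≤ c) (hclen : c < (sx.length : Int)) (hci : c < i)
    (hir : i ≤ c + pvRad sx c) (hge : c + pvRad sx c - i ≤ pvRad sx (c * 2 - i)) :
    pvRad sx i = pvExpandB sx i (c + pvRad sx c - i) := by
  have h0 : 0 ≤ c + pvRad sx c - i := by omega
  have hch : ∀ k, 1 ≤ k → k ≤ c + pvRad sx c - i → pvMatch sx i k := by
    intro k hk1 hk2
    exact (pvMirror_match sx c i k hc0 hclen hci hk1 hk2).2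
      (pvRad_match sx (c * 2 - i) k (by omega) (by omega))
  exact pvExpandB_chain sx i (c + pvRad sx c - i) h0 hch

-- A's while loop computes exactly B's expansion
theorem pvWhileA_eq (sx : List Char) (i d : Int) :
    (pvWhileA sx (i - d - 1) (i + d + 1) d).1 = pvExpandB sx i d := by
  induction d using pvExpandB.induct (sx := sx) (i := i) with
  | case1 d h ih =>
    rw [pvWhileA, dif_pos h, pvExpandB, dif_pos h,
        show i - d - 1 - 1 = i - (d + 1) - 1 by ring, show i + d + 1 + 1 = i + (d + 1) + 1 by ring]
    exact ih
  | case2 d h => rw [pvWhileA, dif_neg h, pvExpandB, dif_neg h]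

theorem pvWhileA_neg (sx : List Char) (n cur : Int) : pvWhileA sx (-1) n cur = (cur, -1, n) := by
  rw [pvWhileA, dif_neg (fun h => by omega)]

-- total-indexing helpers on in-range Int indices
theorem pv_getD_setD (xs : List Int) (i j v : Int)
    (h0i : 0 ≤ i) (hi : i < (xs.length : Int)) (h0j : 0 ≤ j) (hj : j < (xs.length : Int)) :
    PySem.List.pyGetD (PySem.List.pySetD xs i v) j 0 =
      if j = i then v else PySem.List.pyGetD xs j 0 := by
  rw [show i = ((i.toNat : Nat) : Int) by omega, show j = ((j.toNat : Nat) : Int) by omega,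
      PySem.List.pyGetD_pySetD_natCast xs i.toNat j.toNat v 0 (by omega)]
  split_ifs with h1 h2 h2 <;> first | rfl | omega

-- loop invariant of A's main loop: processed prefix of rslt holds B's radii,
-- and r is the palindrome border of center c
def pvInv (sx : List Char) (i : Int) (st : List Int × Int × Int × Int × Int) : Prop :=
  st.1.length = sx.length ∧
  (∀ k : Int, 0 ≤ k → k < (sx.length : Int) →
    PySem.List.pyGetD st.1 k 0 = if k < i then pvRad sx k else 0) ∧
  0 ≤ st.2.1 ∧ st.2.1 < i ∧ st.2.2.1 = st.2.1 + pvRad sx st.2.1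

theorem pvStep_inv (sx : List Char) (i : Int) (h1 : 1 ≤ i) (h2 : i < (sx.length : Int))
    (st : List Int × Int × Int × Int × Int) (hinv : pvInv sx i st) :
    pvInv sx (i + 1) (pvStepA sx st i) := by
  obtain ⟨rslt, c, r, m, n⟩ := st
  obtain ⟨hlen, hcont, hc0, hci, hr⟩ := hinv
  simp only at hlen hcont hc0 hci hr
  have hrlen : (rslt.length : Int) = (sx.length : Int) := by omega
  -- common tail: after the branch, the while loop computes pvRad sx i and it is written back
  have tail : ∀ (rslt1 : List Int) (m1 n1 v : Int), rslt1 = PySem.List.pySetD rslt i v →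
      (pvWhileA sx m1 n1 (PySem.List.pyGetD rslt1 i 0)).1 = pvRad sx i →
      pvInv sx (i + 1)
        (let (cur, m2, n2) := pvWhileA sx m1 n1 (PySem.List.pyGetD rslt1 i 0);
         let rslt2 := PySem.List.pySetD rslt1 i cur;
         if i + cur > r then (rslt2, i, i + cur, m2, n2) else (rslt2, c, r, m2, n2)) := by
    intro rslt1 m1 n1 v hr1 hwhile
    rcases goalW : pvWhileA sx m1 n1 (PySem.List.pyGetD rslt1 i 0) with ⟨cur, m2, n2⟩
    rw [goalW] at hwhile
    dsimp only at hwhile ⊢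
    subst hwhile
    have hlen1 : rslt1.length = rslt.length := by rw [hr1, PySem.List.length_pySetD]
    have hcont2 : ∀ k : Int, 0 ≤ k → k < (sx.length : Int) →
        PySem.List.pyGetD (PySem.List.pySetD rslt1 i (pvRad sx i)) k 0 =
          if k < i + 1 then pvRad sx k else 0 := by
      intro k hk0 hk1
      rw [pv_getD_setD rslt1 i k (pvRad sx i) (by omega) (by omega) hk0 (by omega)]
      by_cases hki : k = i
      · rw [if_pos hki, if_pos (by omega), hki]
      · rw [if_neg hki, hr1,
          pv_getD_setD rslt i k v (by omega) (by omega) hk0 (by omega),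
          if_neg hki, hcont k hk0 hk1]
        by_cases hlt : k < i
        · rw [if_pos hlt, if_pos (by omega)]
        · rw [if_neg hlt, if_neg (by omega)]
    by_cases hgt : i + pvRad sx i > r
    · rw [if_pos hgt]
      unfold pvInv
      dsimp only
      exact ⟨by rw [PySem.List.length_pySetD]; omega, hcont2, by omega, by omega, rfl⟩
    · rw [if_neg hgt]
      unfold pvInv
      dsimp only
      exact ⟨by rw [PySem.List.length_pySetD]; omega, hcont2, hc0, by omega, hr⟩
  simp only [pvStepA]
  by_cases hir : i > r
  · rw [if_pos hir]
    refine tail (PySem.List.pySetD rslt i 0) (i - 1) (i + 1) 0 rfl ?_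
    have hv : PySem.List.pyGetD (PySem.List.pySetD rslt i 0) i 0 = 0 := by
      rw [pv_getD_setD rslt i i 0 (by omega) (by omega) (by omega) (by omega), if_pos rfl]
    rw [hv]
    have := pvWhileA_eq sx i 0
    rw [show i - 0 - 1 = i - 1 by ring, show i + 0 + 1 = i + 1 by ring] at this
    exact this
  · rw [if_neg hir]
    have hbc := pvRad_bounds sx c (by omega) (by omega)
    have hρ := pvRad_nonneg sx c
    have hi2v : PySem.List.pyGetD rslt (c * 2 - i) 0 = pvRad sx (c * 2 - i) := by
      rw [hcont (c * 2 - i) (by omega) (by omega), if_pos (by omega)]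
    rw [hi2v]
    by_cases hcase : pvRad sx (c * 2 - i) < r - i
    · rw [if_pos hcase]
      refine tail _ (-1) n (pvRad sx (c * 2 - i)) rfl ?_
      have hv : PySem.List.pyGetD (PySem.List.pySetD rslt i (pvRad sx (c * 2 - i))) i 0 =
          pvRad sx (c * 2 - i) := by
        rw [pv_getD_setD rslt i i _ (by omega) (by omega) (by omega) (by omega), if_pos rfl]
      rw [hv, pvWhileA_neg]
      exact (pvMirror_lt sx c i hc0 (by omega) (by omega) (by omega)).symm
    · rw [if_neg hcase]
      refine tail _ (i * 2 - (r + 1)) (r + 1) (r - i) rfl ?_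
      have hv : PySem.List.pyGetD (PySem.List.pySetD rslt i (r - i)) i 0 = r - i := by
        rw [pv_getD_setD rslt i i _ (by omega) (by omega) (by omega) (by omega), if_pos rfl]
      rw [hv]
      have hW := pvWhileA_eq sx i (r - i)
      rw [show i - (r - i) - 1 = i * 2 - (r + 1) by ring,
          show i + (r - i) + 1 = r + 1 by ring] at hW
      rw [hW, hr]
      exact (pvMirror_ge sx c i hc0 (by omega) (by omega) (by omega) (by omega)).symm

theorem pvFold_inv (sx : List Char) (j : Int) (hj1 : 1 ≤ j) (hj2 : j ≤ (sx.length : Int)) :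
    pvInv sx j ((PySem.List.pyRange 1 j 1).foldl (pvStepA sx)
      (List.replicate sx.length (0 : Int), 0, 0, 0, 0)) := by
  induction j, hj1 using Int.le_induction with
  | base =>
    rw [PySem.List.pyRange_one_eq_nil le_rfl, List.foldl_nil]
    refine ⟨by simp, ?_, le_rfl, Int.zero_lt_one, by show (0:Int) = 0 + pvRad sx 0; rw [pvRad_zero, Int.add_zero]⟩
    intro k hk0 hk1
    show PySem.List.pyGetD (List.replicate sx.length (0 : Int)) k 0 = if k < 1 then pvRad sx k else 0
    have hget : PySem.List.pyGetD (List.replicate sx.length (0 : Int)) k 0 = 0 := by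
      rw [show k = ((k.toNat : Nat) : Int) by omega, PySem.List.pyGetD_natCast]
      simp [List.getD]
    by_cases hk : k < 1
    · have hk0' : k = 0 := by omega
      subst hk0'
      rw [if_pos hk, pvRad_zero]
      exact hget
    · rw [if_neg hk, hget]
  | succ j hj ih =>
    rw [PySem.List.pyRange_one_succ_right (by omega), List.foldl_append]
    exact pvStep_inv sx j hj (by omega) _ (ih (by omega))

theorem pvRslt_eq (sx : List Char) :
    ((PySem.List.pyRange 1 (sx.length : Int) 1).foldl (pvStepA sx)
      (List.replicate sx.length (0 : Int), 0, 0, 0, 0)).1 =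
    (PySem.List.pyRange 0 (sx.length : Int) 1).map (fun i => pvExpandB sx i 0) := by
  by_cases h0 : sx.length = 0
  · rw [PySem.List.pyRange_one_eq_nil (by omega : ((sx.length : Int)) ≤ 1), List.foldl_nil,
        PySem.List.pyRange_one_eq_nil (by omega : ((sx.length : Int)) ≤ 0)]
    simp [h0]
  · obtain ⟨hlen, hcont, -, -, -⟩ :=
      pvFold_inv sx (sx.length : Int) (by omega) le_rfl
    apply List.ext_getElem
    · rw [hlen, List.length_map, PySem.List.length_pyRange_one]
      omega
    · intro nn hn1 hn2
      have hval := hcont (nn : Int) (by omega) (by omega)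
      rw [if_pos (by omega), PySem.List.pyGetD_natCast, List.getD_eq_getElem _ _ hn1] at hval
      rw [hval, List.getElem_map, PySem.List.getElem_pyRange_one]
      rw [show (0 : Int) + (nn : Int) = (nn : Int) by ring]
      rfl

theorem pvRes_eq (slen : Nat) (sxlen : Int) (l : List Int) :
    pvResA slen sxlen l = pvResB slen sxlen l := rfl

-- ===== VERDICT (by name: the statement is the Claim_ definition above) =====
theorem build_palindrome_lookup_spec : Claim_equal_build_palindrome_lookup := by
  intro s _
  unfold Spec_build_palindrome_lookup build_palindrome_lookup build_palindrome_lookup_alt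
  simp only
  rw [pvRslt_eq, pvRes_eq]
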